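-- pv_equiv track=rewrite | github.com/ZhikunWei/Interview-Code-Problem2021_fall | tx_music_0916/2.py | maxLexicographical
-- ===== SOURCE A (Python) =====
-- def maxLexicographical(num ):
--     nums = []
--     for x in num:
--         nums.append(x)
--     # write code here
--     start = False
--     end = False
--     for i in range(len(nums)):
--         if nums[i] == '0' and not start:
--             start = True
--         if nums[i] == '1' and start:
--             end = True
--             break
--         if start and not end:
--             nums[i] = '1'
--     return ''.join(nums)
-- ===== SOURCE B (Python) =====
-- def maxLexicographical(num):
--     nums = list(num)
--     if '0' not in nums:
--         return ''.join(nums)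
--     start = nums.index('0')
--     tail = nums[start:]
--     width = tail.index('1') if '1' in tail else len(tail)
--     return ''.join(nums[:start]) + '1' * width + ''.join(nums[start + width:])
-- ===== Notes on version B (the rewrite author's own statement) =====
-- stated objective: alternative
-- what changed: B computes the two boundaries up front (index of the first '0', then index of the next '1' or end of string) and rebuilds the string as prefix + run of '1's + suffix, instead of A's single pass driven by start/end flags with a break.
import Mathlib
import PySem

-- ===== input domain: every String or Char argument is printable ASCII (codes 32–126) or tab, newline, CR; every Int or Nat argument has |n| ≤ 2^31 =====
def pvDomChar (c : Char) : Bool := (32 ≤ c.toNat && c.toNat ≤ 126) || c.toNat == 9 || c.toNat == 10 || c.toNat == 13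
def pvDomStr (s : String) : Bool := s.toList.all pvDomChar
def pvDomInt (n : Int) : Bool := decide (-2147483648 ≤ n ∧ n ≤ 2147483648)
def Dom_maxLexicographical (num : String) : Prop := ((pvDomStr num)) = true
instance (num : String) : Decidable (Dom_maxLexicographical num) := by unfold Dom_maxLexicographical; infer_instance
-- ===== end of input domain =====

-- B computes the two boundaries (first '0', next '1') and rebuilds the string by slices,
-- instead of A's single flag-driven state-machine pass; objective: alternative decomposition.

-- ===== PORT A =====
-- the range-loop with its `start` flag and `break`; once broken the rest of `nums` is unchanged
def pvGoA : List Char → Bool → List Char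
  | [], _ => []
  | c :: rest, start =>
    let start1 := if c = '0' ∧ start = false then true else start
    if c = '1' ∧ start1 = true then c :: rest          -- end = True; break
    else (if start1 then '1' else c) :: pvGoA rest start1

def maxLexicographical (num : String) : String :=
  String.ofList (pvGoA num.toList false)                   -- nums = [x for x in num]; ''.join(nums)

-- ===== PORT B =====
-- `'0' not in nums` + `nums.index('0')` ported together as a match on PySem.List.index?;
-- slices nums[:start], nums[start:], nums[start+width:] with nonnegative in-range Nat bounds
-- are List.take/List.drop (PySem.List.slice_from_natCast / slice_to_natCast).
def maxLexicographical_alt (num : String) : String :=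
  let nums := num.toList
  match PySem.List.index? nums '0' with
  | none => String.ofList nums
  | some start =>
    let tail := nums.drop start
    let width := match PySem.List.index? tail '1' with
      | some w => w
      | none => tail.length
    String.ofList (nums.take start ++ List.replicate width '1' ++ nums.drop (start + width))

-- ===== PRECONDITION & SPEC =====
def Spec_maxLexicographical (num : String) (out : String) : Prop := out = maxLexicographical_alt num
instance (num : String) (out : String) : Decidable (Spec_maxLexicographical num out) := by unfold Spec_maxLexicographical; infer_instance

-- ===== CLAIM (what is proved, stated in full; the proofs are below) =====
def Claim_equal_maxLexicographical : Prop := ∀ (num : String), Dom_maxLexicographical num → Spec_maxLexicographical num (maxLexicographical num)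

-- ===== LEMMAS AND PROOFS =====

theorem pvGoA_no_zero (l : List Char) (h : '0' ∉ l) : pvGoA l false = l := by
  induction l with
  | nil => rfl
  | cons c rest ih =>
    have hc : c ≠ '0' := fun hc => h (hc ▸ List.mem_cons_self)
    simp [pvGoA, hc, ih (fun hm => h (List.mem_cons_of_mem _ hm))]

theorem pvGoA_prefix (p m : List Char) (h : '0' ∉ p) :
    pvGoA (p ++ m) false = p ++ pvGoA m false := by
  induction p with
  | nil => rfl
  | cons c rest ih =>
    have hc : c ≠ '0' := fun hc => h (hc ▸ List.mem_cons_self)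
    simp [pvGoA, hc, ih (fun hm => h (List.mem_cons_of_mem _ hm))]

theorem pvGoA_zero (t : List Char) : pvGoA ('0' :: t) false = '1' :: pvGoA t true := by
  simp [pvGoA]

theorem pvGoA_true_no_one (t : List Char) (h : '1' ∉ t) :
    pvGoA t true = List.replicate t.length '1' := by
  induction t with
  | nil => rfl
  | cons c rest ih =>
    have hc : c ≠ '1' := fun hc => h (hc ▸ List.mem_cons_self)
    simp [pvGoA, hc, ih (fun hm => h (List.mem_cons_of_mem _ hm)), List.replicate_succ]

theorem pvGoA_true_one (q s : List Char) (h : '1' ∉ q) :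
    pvGoA (q ++ '1' :: s) true = List.replicate q.length '1' ++ '1' :: s := by
  induction q with
  | nil => simp [pvGoA]
  | cons c rest ih =>
    have hc : c ≠ '1' := fun hc => h (hc ▸ List.mem_cons_self)
    simp [pvGoA, hc, ih (fun hm => h (List.mem_cons_of_mem _ hm)), List.replicate_succ]

-- ===== VERDICT (by name: the statement is the Claim_ definition above) =====
theorem maxLexicographical_spec : Claim_equal_maxLexicographical := by
  intro num _
  unfold Spec_maxLexicographical
  simp only [maxLexicographical, maxLexicographical_alt]
  rcases h0 : PySem.List.index? num.toList '0' with _ | start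
  · -- no '0' in the string: A passes everything through
    have : '0' ∉ num.toList := (PySem.List.index?_eq_none_iff _ _).mp h0
    rw [pvGoA_no_zero _ this]
  · obtain ⟨p, t, hsplit, hlen, hp⟩ := (PySem.List.index?_eq_some_iff _ _ _).mp h0
    rw [hsplit]
    have hdrop : List.drop start (p ++ '0' :: t) = '0' :: t := by
      simp [hlen]
    have htake : List.take start (p ++ '0' :: t) = p := by
      simp [hlen]
    rcases h1 : PySem.List.index? t '1' with _ | k
    · -- no '1' after the first '0': flip the whole tail
      have ht : '1' ∉ t := (PySem.List.index?_eq_none_iff _ _).mp h1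
      have h1' : PySem.List.index? ('0' :: t) '1' = none := by
        rw [PySem.List.index?_cons_of_ne _ (by decide), h1]; rfl
      have hd : List.drop (start + (t.length + 1)) (p ++ '0' :: t) = [] := by
        apply List.drop_eq_nil_of_le; simp [hlen]
      simp only [hdrop, htake, h1', List.length_cons, hd]
      rw [pvGoA_prefix p _ hp, pvGoA_zero, pvGoA_true_no_one t ht]
      simp [List.replicate_succ]
    · -- first '1' after the first '0' is at offset k in t
      obtain ⟨q, sfx, htq, hqlen, hq⟩ := (PySem.List.index?_eq_some_iff _ _ _).mp h1
      have h1' : PySem.List.index? ('0' :: t) '1' = some (k + 1) := by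
        rw [PySem.List.index?_cons_of_ne _ (by decide), h1]; rfl
      have hd : List.drop (start + (k + 1)) (p ++ '0' :: t) = '1' :: sfx := by
        have harr : p ++ '0' :: t = (p ++ '0' :: q) ++ '1' :: sfx := by simp [htq]
        have hl2 : start + (k + 1) = (p ++ '0' :: q).length := by
          simp [hlen, hqlen]
        rw [harr, hl2]
        simp
      simp only [hdrop, htake, h1', hd]
      rw [pvGoA_prefix p _ hp, pvGoA_zero, htq, pvGoA_true_one q sfx hq, hqlen]
      simp [List.replicate_succ]
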